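-- pv_equiv track=rewrite | github.com/vzdr/Quantum-RAG | data/medical_diagnosis/validate_similarity_structure.py | identify_clusters
-- ===== SOURCE A (Python) =====
-- from typing import Dict, List, Tuple
--
-- def identify_clusters(filenames: List[str], metadata: Dict) -> Dict[str, List[int]]:
--     """Map cluster names to document indices."""
--     clusters = metadata.get('clusters', {})
--     cluster_indices = {}
--
--     for cluster_name, cluster_info in clusters.items():
--         cluster_docs = cluster_info.get('docs', [])
--         indices = []
--         for i, fn in enumerate(filenames):
--             if fn in cluster_docs:
--                 indices.append(i)
--         cluster_indices[cluster_name] = indices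
--
--     return cluster_indices
-- ===== SOURCE B (Python) =====
-- def identify_clusters(filenames, metadata):
--     """Map cluster names to document indices."""
--     clusters = metadata.get('clusters', {})
--     result = {name: [] for name in clusters}
--     doc_to_clusters = {}
--     for name, info in clusters.items():
--         for doc in dict.fromkeys(info.get('docs', [])):
--             doc_to_clusters.setdefault(doc, []).append(name)
--     for i, fn in enumerate(filenames):
--         for name in doc_to_clusters.get(fn, []):
--             result[name].append(i)
--     return result
-- ===== Notes on version B (the rewrite author's own statement) =====
-- stated objective: alternative
-- what changed: Instead of re-scanning all filenames once per cluster with an inner 'fn in docs' list scan, B pre-initializes the result, inverts the metadata into a doc->cluster-names dict, and fills every cluster's index list in one ordered pass over the filenames.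
import Mathlib
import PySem

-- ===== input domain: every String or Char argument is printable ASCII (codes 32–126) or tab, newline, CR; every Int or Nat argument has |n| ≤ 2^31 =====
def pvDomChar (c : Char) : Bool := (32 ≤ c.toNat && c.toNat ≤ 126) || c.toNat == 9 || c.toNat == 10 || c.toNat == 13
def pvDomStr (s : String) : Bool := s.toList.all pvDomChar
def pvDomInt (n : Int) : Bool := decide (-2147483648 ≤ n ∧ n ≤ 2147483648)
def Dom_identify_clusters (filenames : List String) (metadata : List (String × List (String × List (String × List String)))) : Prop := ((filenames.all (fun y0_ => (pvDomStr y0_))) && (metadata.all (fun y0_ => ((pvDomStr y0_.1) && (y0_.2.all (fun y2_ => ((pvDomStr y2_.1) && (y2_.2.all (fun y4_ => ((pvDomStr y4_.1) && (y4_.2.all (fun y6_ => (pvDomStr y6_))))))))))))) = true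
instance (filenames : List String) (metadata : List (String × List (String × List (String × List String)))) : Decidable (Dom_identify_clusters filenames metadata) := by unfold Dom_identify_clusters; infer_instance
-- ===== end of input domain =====

-- B inverts the metadata into a doc -> cluster-names dict and fills all index lists in
-- one ordered pass over the filenames, instead of A's per-cluster scan of all filenames.

-- ===== PORT A =====
def identify_clusters (filenames : List String) (metadata : List (String × List (String × List (String × List String)))) : List (String × List Int) :=
  let clusters := PySem.Dict.ofList ((PySem.Dict.ofList metadata).getD "clusters" [])
  let cluster_indices := clusters.items.foldl (fun (acc : PySem.Dict String (List Int)) ci =>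
      let cluster_docs := (PySem.Dict.ofList ci.2).getD "docs" []
      let indices := (PySem.List.enumerate filenames 0).foldl
          (fun idxs p => if cluster_docs.contains p.2 then idxs ++ [p.1] else idxs) []
      acc.insert ci.1 indices) PySem.Dict.empty
  cluster_indices.items

-- ===== PORT B =====
def identify_clusters_alt (filenames : List String) (metadata : List (String × List (String × List (String × List String)))) : List (String × List Int) :=
  let clusters := PySem.Dict.ofList ((PySem.Dict.ofList metadata).getD "clusters" [])
  -- result = {name: [] for name in clusters}
  let result0 := clusters.items.foldl (fun (d : PySem.Dict String (List Int)) ci => d.insert ci.1 []) PySem.Dict.empty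
  -- doc_to_clusters: for each cluster, for each of its distinct docs, append the cluster name
  let doc_to_clusters := clusters.items.foldl
      (fun (d : PySem.Dict String (List String)) ci =>
        (PySem.List.dedup ((PySem.Dict.ofList ci.2).getD "docs" [])).foldl
          (fun d doc => d.modify doc [] (· ++ [ci.1])) d) PySem.Dict.empty
  -- one ordered pass over the filenames; 'result[name].append(i)' — name is always a key of
  -- result0 here, so 'modify' is exactly Python's in-place append
  let result := (PySem.List.enumerate filenames 0).foldl
      (fun (r : PySem.Dict String (List Int)) p =>
        (doc_to_clusters.getD p.2 []).foldl (fun r name => r.modify name [] (· ++ [p.1])) r) result0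
  result.items

-- ===== PRECONDITION & SPEC =====
def Spec_identify_clusters (filenames : List String) (metadata : List (String × List (String × List (String × List String)))) (out : List (String × List Int)) : Prop := out = identify_clusters_alt filenames metadata
instance (filenames : List String) (metadata : List (String × List (String × List (String × List String)))) (out : List (String × List Int)) : Decidable (Spec_identify_clusters filenames metadata out) := by unfold Spec_identify_clusters; infer_instance

-- ===== CLAIM (what is proved, stated in full; the proofs are below) =====
def Claim_equal_identify_clusters : Prop := ∀ (filenames : List String) (metadata : List (String × List (String × List (String × List String)))), Dom_identify_clusters filenames metadata → Spec_identify_clusters filenames metadata (identify_clusters filenames metadata)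

-- ===== LEMMAS AND PROOFS =====

-- Appending a constant tail at each key of a Nodup key list: the lookup of n gains the tail
-- exactly when n is in the list.
theorem pv_modify_nodup_getD {ν : Type} (names : List String) (hnd : names.Nodup)
    (t : List ν) (r : PySem.Dict String (List ν)) (n : String) :
    (names.foldl (fun r name => r.modify name [] (· ++ t)) r).getD n []
      = r.getD n [] ++ if names.contains n then t else [] := by
  induction names generalizing r with
  | nil => simp
  | cons a names ih =>
    have hnd' := (List.nodup_cons.mp hnd).2
    have hna := (List.nodup_cons.mp hnd).1
    rw [List.foldl_cons, ih hnd']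
    by_cases h : n = a
    · subst h
      simp [PySem.Dict.getD_modify_self, hna]
    · simp [PySem.Dict.getD_modify, h]

-- The doc_to_clusters dict: looking up a doc gives, in cluster order, the names of the
-- clusters whose docs contain it.
theorem pv_doc2_getD (items : List (String × List (String × List String)))
    (d : PySem.Dict String (List String)) (doc : String) :
    (items.foldl
      (fun (d : PySem.Dict String (List String)) ci =>
        (PySem.List.dedup ((PySem.Dict.ofList ci.2).getD "docs" [])).foldl
          (fun d x => d.modify x [] (· ++ [ci.1])) d) d).getD doc []
    = d.getD doc []
      ++ (items.filter (fun ci => ((PySem.Dict.ofList ci.2).getD "docs" []).contains doc)).map (·.1) := by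
  induction items generalizing d with
  | nil => simp
  | cons ci items ih =>
    rw [List.foldl_cons, ih]
    rw [pv_modify_nodup_getD _ (PySem.List.nodup_dedup _) _ d doc]
    by_cases h : doc ∈ (PySem.Dict.ofList ci.2).getD "docs" [] <;>
      simp [h]

-- The index-filling pass: the final lookup of n is the initial one followed by the indices
-- of the filenames whose looked-up name list contains n.
theorem pv_fill_getD (E : List (Int × String)) (d2 : PySem.Dict String (List String))
    (hnd : ∀ s, (d2.getD s []).Nodup) (r : PySem.Dict String (List Int)) (n : String) :
    (E.foldl (fun (r : PySem.Dict String (List Int)) p =>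
        (d2.getD p.2 []).foldl (fun r name => r.modify name [] (· ++ [p.1])) r) r).getD n []
    = r.getD n [] ++ (E.filter (fun p => (d2.getD p.2 []).contains n)).map (·.1) := by
  induction E generalizing r with
  | nil => simp
  | cons p E ih =>
    rw [List.foldl_cons, ih, pv_modify_nodup_getD _ (hnd p.2) _ r n]
    by_cases h : n ∈ d2.getD p.2 [] <;> simp [h]

-- result0: every lookup (with default []) is [].
theorem pv_result0_getD (items : List (String × List (String × List String)))
    (d : PySem.Dict String (List Int)) (hd : ∀ s, d.getD s [] = []) (n : String) :
    (items.foldl (fun (d : PySem.Dict String (List Int)) ci => d.insert ci.1 []) d).getD n [] = [] := by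
  induction items generalizing d with
  | nil => exact hd n
  | cons ci items ih =>
    rw [List.foldl_cons]
    apply ih
    intro s
    by_cases h : s = ci.1 <;> simp [PySem.Dict.getD_insert, h, hd s]

-- result0's keys are exactly the cluster keys, in order.
theorem pv_result0_keys (items : List (String × List (String × List String)))
    (hnd : (items.map (·.1)).Nodup) :
    (items.foldl (fun (d : PySem.Dict String (List Int)) ci => d.insert ci.1 []) PySem.Dict.empty).keys
      = items.map (·.1) := by
  rw [PySem.Dict.keys_foldl_insert_key items (·.1) (fun _ _ => ([] : List Int))]
  show PySem.Set.update ([] : PySem.Set String) (items.map (·.1)) = items.map (·.1)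
  show PySem.Set.ofList (items.map (·.1)) = items.map (·.1)
  exact PySem.Set.ofList_eq_self_of_nodup _ hnd

-- One append pass over names already present as keys leaves the key list unchanged.
theorem pv_modify_keys {ν : Type} (names : List String) (t : List ν)
    (r : PySem.Dict String (List ν)) (h : ∀ n ∈ names, r.contains n = true) :
    (names.foldl (fun r name => r.modify name [] (· ++ t)) r).keys = r.keys := by
  induction names generalizing r with
  | nil => rfl
  | cons a names ih =>
    rw [List.foldl_cons]
    have hk : (r.modify a [] (· ++ t)).keys = r.keys := by
      rw [PySem.Dict.keys_modify, PySem.Dict.keys_insert_of_contains _ _ (h a (by simp))]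
    rw [ih _ (fun n hn => by
      rw [PySem.Dict.contains_eq_decide_mem_keys, hk, ← PySem.Dict.contains_eq_decide_mem_keys]
      exact h n (by simp [hn])), hk]

-- The filling pass keeps the key list unchanged when every name it touches is already a key.
theorem pv_fill_keys (E : List (Int × String)) (d2 : PySem.Dict String (List String))
    (r : PySem.Dict String (List Int))
    (h : ∀ s n, n ∈ d2.getD s [] → n ∈ r.keys) :
    (E.foldl (fun (r : PySem.Dict String (List Int)) p =>
        (d2.getD p.2 []).foldl (fun r name => r.modify name [] (· ++ [p.1])) r) r).keys = r.keys := by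
  induction E generalizing r with
  | nil => rfl
  | cons p E ih =>
    rw [List.foldl_cons]
    have hk : ((d2.getD p.2 []).foldl (fun r name => r.modify name [] (· ++ [p.1])) r).keys = r.keys :=
      pv_modify_keys _ _ r (fun n hn => by
        rw [PySem.Dict.contains_eq_decide_mem_keys]; exact decide_eq_true (h p.2 n hn))
    rw [ih _ (fun s n hn => by rw [hk]; exact h s n hn), hk]

-- ===== VERDICT (by name: the statement is the Claim_ definition above) =====
theorem identify_clusters_spec : Claim_equal_identify_clusters := by
  intro filenames metadata _
  unfold Spec_identify_clusters identify_clusters identify_clusters_alt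
  simp only []
  set items := (PySem.Dict.ofList ((PySem.Dict.ofList metadata).getD "clusters" [])).items with hitems
  have hknd : (items.map (·.1)).Nodup := PySem.Dict.nodup_keys_ofList _
  set E := PySem.List.enumerate filenames 0 with hE
  set d2 := items.foldl
      (fun (d : PySem.Dict String (List String)) ci =>
        (PySem.List.dedup ((PySem.Dict.ofList ci.2).getD "docs" [])).foldl
          (fun d x => d.modify x [] (· ++ [ci.1])) d) PySem.Dict.empty with hd2
  have hd2getD : ∀ s, d2.getD s []
      = (items.filter (fun ci => ((PySem.Dict.ofList ci.2).getD "docs" []).contains s)).map (·.1) := by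
    intro s; rw [hd2, pv_doc2_getD]; simp
  set r0 := items.foldl (fun (d : PySem.Dict String (List Int)) ci => d.insert ci.1 []) PySem.Dict.empty with hr0
  have hr0keys : r0.keys = items.map (·.1) := pv_result0_keys items hknd
  set result := E.foldl
      (fun (r : PySem.Dict String (List Int)) p =>
        (d2.getD p.2 []).foldl (fun r name => r.modify name [] (· ++ [p.1])) r) r0 with hres
  -- keys of the final B dict
  have hreskeys : result.keys = items.map (·.1) := by
    rw [hres, pv_fill_keys _ _ _ (fun s n hn => by
      rw [hr0keys]
      rw [hd2getD s] at hn
      obtain ⟨ci, hci, rfl⟩ := List.mem_map.mp hn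
      exact List.mem_map.mpr ⟨ci, List.mem_of_mem_filter hci, rfl⟩), hr0keys]
  have hnd2 : ∀ s, (d2.getD s []).Nodup := by
    intro s
    rw [hd2getD s]
    exact hknd.sublist (List.Sublist.map _ List.filter_sublist)
  -- A's items
  rw [PySem.Dict.items_foldl_insert_fresh items (·.1)
      (fun ci => E.foldl (fun idxs p => if ((PySem.Dict.ofList ci.2).getD "docs" []).contains p.2 then idxs ++ [p.1] else idxs) [])
      PySem.Dict.empty (fun a _ => PySem.Dict.contains_empty _) hknd]
  -- B's items
  rw [PySem.Dict.items_eq_map_keys result (hreskeys ▸ hknd) []]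
  rw [hreskeys, List.map_map]
  rw [show (PySem.Dict.empty : PySem.Dict String (List Int)).items = [] from rfl, List.nil_append]
  apply List.map_congr_left
  intro ci hci
  have hresget : result.getD ci.1 []
      = (E.filter (fun p => (d2.getD p.2 []).contains ci.1)).map (·.1) := by
    rw [hres, pv_fill_getD E d2 hnd2 r0 ci.1, hr0, pv_result0_getD _ _ (fun s => PySem.Dict.getD_empty s []), List.nil_append]
  have hfiltcong : ∀ p : Int × String,
      (d2.getD p.2 []).contains ci.1 = ((PySem.Dict.ofList ci.2).getD "docs" []).contains p.2 := by
    intro p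
    rw [hd2getD p.2]
    by_cases hc : ((PySem.Dict.ofList ci.2).getD "docs" []).contains p.2
    · have : ci.1 ∈ (items.filter (fun ci' => ((PySem.Dict.ofList ci'.2).getD "docs" []).contains p.2)).map (·.1) :=
        List.mem_map.mpr ⟨ci, List.mem_filter.mpr ⟨hci, hc⟩, rfl⟩
      rw [hc]; simpa using this
    · have : ci.1 ∉ (items.filter (fun ci' => ((PySem.Dict.ofList ci'.2).getD "docs" []).contains p.2)).map (·.1) := by
        intro hmem
        obtain ⟨ci', hci', he⟩ := List.mem_map.mp hmem
        have := List.inj_on_of_nodup_map hknd (List.mem_of_mem_filter hci') hci he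
        subst this
        exact hc (List.mem_filter.mp hci').2
      have hc' : ((PySem.Dict.ofList ci.2).getD "docs" []).contains p.2 = false := by simpa using hc
      rw [hc']; simpa using this
  have : (E.filter (fun p => (d2.getD p.2 []).contains ci.1))
      = E.filter (fun p => ((PySem.Dict.ofList ci.2).getD "docs" []).contains p.2) :=
    List.filter_congr (fun p _ => hfiltcong p)
  simp only [Function.comp_apply]
  rw [hresget, this,
    PySem.List.foldl_append_if (fun p : Int × String => ((PySem.Dict.ofList ci.2).getD "docs" []).contains p.2) (·.1) E [],
    List.nil_append]
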